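-- pv_equiv track=rewrite | github.com/BackofenLab/IntaRNA | python/intarnapvalue/dinucl_shuffle.py | compute_count_and_lists
-- ===== SOURCE A (Python) =====
-- def compute_count_and_lists(s):
--     # WARNING: Use of function count(s,'UU') returns 1 on word UUU
--     # since it apparently counts only nonoverlapping words UU
--     # For this reason, we work with the indices.
--
--     # Initialize lists and mono- and dinucleotide dictionaries
--     nucl_dict = {
--       'A': [],
--       'G': [],
--       'C': [],
--       'U': []
--     }  # List is a dictionary of lists
--     nucl_list = ["A", "C", "G", "U"]
--     s = s.upper().replace("T", "U")
--     nucl_cnt = {}  # empty dictionary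
--     dinucl_cnt = {}  # empty dictionary
--     for x in nucl_list:
--         nucl_cnt[x] = 0
--         dinucl_cnt[x] = {}
--         for y in nucl_list:
--             dinucl_cnt[x][y] = 0
--
--     # Compute count and lists
--     nucl_cnt[s[0]] = 1
--     nucl_total = 1
--     dinucl_total = 0
--     for i in range(len(s)-1):
--         x = s[i]
--         y = s[i+1]
--         nucl_dict[x].append(y)
--         nucl_cnt[y] += 1
--         nucl_total += 1
--         dinucl_cnt[x][y] += 1
--         dinucl_total += 1
--     assert (nucl_total == len(s))
--     assert (dinucl_total == len(s)-1)
--     return nucl_cnt, dinucl_cnt, nucl_dict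
-- ===== SOURCE B (Python) =====
-- def compute_count_and_lists(s):
--     s = s.upper().replace("T", "U")
--     nucl_list = ["A", "C", "G", "U"]
--     # successor lists: one pass over the adjacent pairs
--     nucl_dict = {'A': [], 'G': [], 'C': [], 'U': []}
--     for x, y in zip(s, s[1:]):
--         nucl_dict[x].append(y)
--     # mononucleotide counts: tally the characters directly
--     nucl_cnt = {x: 0 for x in nucl_list}
--     for c in s:
--         nucl_cnt[c] += 1
--     # dinucleotide counts: derived from the successor lists in a second pass
--     dinucl_cnt = {}
--     for x in nucl_list:
--         row = {y: 0 for y in nucl_list}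
--         for y in nucl_dict[x]:
--             row[y] += 1
--         dinucl_cnt[x] = row
--     return nucl_cnt, dinucl_cnt, nucl_dict
-- ===== Notes on version B (the rewrite author's own statement) =====
-- stated objective: alternative
-- what changed: A builds all three dictionaries in one interleaved index loop seeded with nucl_cnt[s[0]]=1; B makes three separate passes: it builds the successor lists from zip(s, s[1:]), tallies nucl_cnt by counting every character of s directly, and derives dinucl_cnt in a second pass from the successor lists instead of from the string.
import Mathlib
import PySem

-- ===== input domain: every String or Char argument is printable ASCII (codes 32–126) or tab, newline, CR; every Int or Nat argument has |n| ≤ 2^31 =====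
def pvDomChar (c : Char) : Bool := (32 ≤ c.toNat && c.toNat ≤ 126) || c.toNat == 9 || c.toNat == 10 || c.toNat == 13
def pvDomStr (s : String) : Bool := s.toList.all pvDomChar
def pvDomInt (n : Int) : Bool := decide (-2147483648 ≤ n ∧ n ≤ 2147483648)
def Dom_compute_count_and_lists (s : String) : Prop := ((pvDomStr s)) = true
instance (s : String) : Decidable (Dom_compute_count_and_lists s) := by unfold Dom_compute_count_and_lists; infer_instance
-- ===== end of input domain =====

-- B builds the three dictionaries in three separate passes (successor lists from the pairs,
-- nucl_cnt by counting the characters directly, dinucl_cnt derived from the successor lists)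
-- instead of A's single interleaved index loop; same cost, different decomposition.

-- ===== PORT A =====
def compute_count_and_lists (s : String) : (List (String × Int)) × (List (String × List (String × Int))) × (List (String × List String)) :=
  let nucl_dict0 : PySem.Dict String (List String) :=
    PySem.Dict.ofList [("A", []), ("G", []), ("C", []), ("U", [])]
  let nucl_list : List String := ["A", "C", "G", "U"]
  let s' : String := PySem.Str.replace (PySem.Str.upper s) "T" "U"
  -- for x in nucl_list: nucl_cnt[x] = 0; dinucl_cnt[x] = {}; for y in nucl_list: dinucl_cnt[x][y] = 0
  let init :=
    nucl_list.foldl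
      (fun (st : PySem.Dict String Int × PySem.Dict String (PySem.Dict String Int)) x =>
        let nc := st.1.insert x 0
        let dc := st.2.insert x PySem.Dict.empty
        let dc := nucl_list.foldl (fun d y => d.modify x PySem.Dict.empty (fun dx => dx.insert y 0)) dc
        (nc, dc))
      (PySem.Dict.empty, PySem.Dict.empty)
  -- nucl_cnt[s[0]] = 1  (s[0] raises IndexError on the empty string — excluded by Pre_)
  let nucl_cnt := init.1.insert (String.ofList [(PySem.Str.pyGet? s' 0).getD ' ']) 1
  -- for i in range(len(s)-1): …  state = (nucl_dict, nucl_cnt, nucl_total, dinucl_cnt, dinucl_total)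
  -- (KeyError on characters outside ACGU is excluded by Pre_; Dict.modify is then exact)
  let fin :=
    (PySem.List.pyRange 0 (PySem.Str.len s' - 1) 1).foldl
      (fun (st : PySem.Dict String (List String) × PySem.Dict String Int × Int × PySem.Dict String (PySem.Dict String Int) × Int) i =>
        let x : String := String.ofList [(PySem.Str.pyGet? s' i).getD ' ']
        let y : String := String.ofList [(PySem.Str.pyGet? s' (i+1)).getD ' ']
        (st.1.modify x [] (· ++ [y]),
         st.2.1.modify y 0 (· + 1),
         st.2.2.1 + 1,
         st.2.2.2.1.modify x PySem.Dict.empty (fun dx => dx.modify y 0 (· + 1)),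
         st.2.2.2.2 + 1))
      (nucl_dict0, nucl_cnt, 1, init.2, 0)
  -- assert nucl_total == len(s); assert dinucl_total == len(s)-1 — both always hold (the
  -- totals advance in lockstep with the loop), so they are no-ops here
  (fin.2.1.items, fin.2.2.2.1.items.map (fun p => (p.1, p.2.items)), fin.1.items)

-- ===== PORT B =====
def compute_count_and_lists_alt (s : String) : (List (String × Int)) × (List (String × List (String × Int))) × (List (String × List String)) :=
  let s' : String := PySem.Str.replace (PySem.Str.upper s) "T" "U"
  let t : List String := s'.toList.map (fun c => String.ofList [c])   -- the characters of s, as 1-char strings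
  let nucl_list : List String := ["A", "C", "G", "U"]
  -- successor lists: one pass over zip(s, s[1:])
  let nucl_dict :=
    (t.zip (PySem.List.slice t (some 1) none)).foldl (fun d p => d.modify p.1 [] (· ++ [p.2]))
      (PySem.Dict.ofList [("A", []), ("G", []), ("C", []), ("U", [])])
  -- mononucleotide counts: tally the characters directly
  let nucl_cnt :=
    t.foldl (fun d c => d.modify c 0 (· + 1))
      (PySem.Dict.ofList (nucl_list.map (fun x => (x, (0 : Int)))))
  -- dinucleotide counts: derived from the successor lists in a second pass
  let dinucl_cnt :=
    nucl_list.foldl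
      (fun D x =>
        let row := (nucl_dict.getD x []).foldl (fun r y => r.modify y 0 (· + 1))
          (PySem.Dict.ofList (nucl_list.map (fun y => (y, (0 : Int)))))
        D.insert x row)
      PySem.Dict.empty
  (nucl_cnt.items, dinucl_cnt.items.map (fun p => (p.1, p.2.items)), nucl_dict.items)

-- ===== PRECONDITION & SPEC =====
-- Pre_ excludes the empty string (A raises IndexError at s[0]) and strings containing a
-- character outside acgut/ACGUT: on those A raises KeyError in its loop — except on
-- single-character invalid strings, where A returns a nucl_cnt carrying an accidental
-- extra key (see the claim's cites); B raises KeyError there.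
def Pre_compute_count_and_lists (s : String) : Prop :=
  s.toList ≠ [] ∧ (s.toList.all (fun c => (['A', 'C', 'G', 'U', 'T', 'a', 'c', 'g', 'u', 't'] : List Char).contains c)) = true
instance (s : String) : Decidable (Pre_compute_count_and_lists s) := by unfold Pre_compute_count_and_lists; infer_instance

def pvWitness_compute_count_and_lists : String := "GAUUACat"

def Spec_compute_count_and_lists (s : String) (out : (List (String × Int)) × (List (String × List (String × Int))) × (List (String × List String))) : Prop := out = compute_count_and_lists_alt s
instance (s : String) (out : (List (String × Int)) × (List (String × List (String × Int))) × (List (String × List String))) : Decidable (Spec_compute_count_and_lists s out) := by unfold Spec_compute_count_and_lists; infer_instance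

-- ===== CLAIM (what is proved, stated in full; the proofs are below) =====
def Claim_equal_compute_count_and_lists : Prop := ∀ (s : String), Dom_compute_count_and_lists s → Pre_compute_count_and_lists s → Spec_compute_count_and_lists s (compute_count_and_lists s)
-- ===== LEMMAS AND PROOFS =====

-- replace with a single-character pattern is a map (specific to the "T"→"U" normalization)
lemma go_TU (fuel : Nat) : ∀ (l : List Char) (acc : List Char), l.length ≤ fuel →
    PySem.Chars.replace.go ['T'] ['U'] fuel l acc = acc.reverse ++ l.map (fun c => if c = 'T' then 'U' else c) := by
  induction fuel with
  | zero =>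
    intro l acc h
    have : l = [] := List.eq_nil_of_length_eq_zero (Nat.le_zero.mp h)
    subst this; simp [PySem.Chars.replace.go]
  | succ n ih =>
    intro l acc h
    cases l with
    | nil => simp [PySem.Chars.replace.go]
    | cons c t =>
      by_cases hc : c = 'T'
      · subst hc
        rw [show PySem.Chars.replace.go ['T'] ['U'] (n+1) ('T' :: t) acc
              = PySem.Chars.replace.go ['T'] ['U'] n t ('U' :: acc) from by
          simp [PySem.Chars.replace.go, List.isPrefixOf]]
        rw [ih t ('U' :: acc) (by simpa using Nat.le_of_succ_le_succ (by simpa using h))]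
        simp
      · rw [show PySem.Chars.replace.go ['T'] ['U'] (n+1) (c :: t) acc
              = PySem.Chars.replace.go ['T'] ['U'] n t (c :: acc) from by
          simp [PySem.Chars.replace.go, List.isPrefixOf, Ne.symm hc]]
        rw [ih t (c :: acc) (by simpa using Nat.le_of_succ_le_succ (by simpa using h))]
        simp [hc]

lemma replace_TU_eq_map (l : List Char) :
    PySem.Chars.replace l ['T'] ['U'] = l.map (fun c => if c = 'T' then 'U' else c) := by
  rw [PySem.Chars.replace]
  simp [go_TU l.length l [] (le_refl _)]

-- the normalized character list: nonempty, every character in ACGU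
lemma norm_chars (s : String) (h : Pre_compute_count_and_lists s) :
    (PySem.Str.replace (PySem.Str.upper s) "T" "U").toList ≠ [] ∧
    ∀ c ∈ (PySem.Str.replace (PySem.Str.upper s) "T" "U").toList, c ∈ (['A', 'C', 'G', 'U'] : List Char) := by
  have ht : (PySem.Str.replace (PySem.Str.upper s) "T" "U").toList
      = s.toList.map (fun c => if PySem.Chars.upperChar c = 'T' then 'U' else PySem.Chars.upperChar c) := by
    rw [PySem.Str.toList_replace, PySem.Str.toList_upper]
    show PySem.Chars.replace (PySem.Chars.upper s.toList) ['T'] ['U'] = _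
    rw [PySem.Chars.upper, replace_TU_eq_map, List.map_map]
    rfl
  rw [ht]
  constructor
  · simpa using h.1
  · intro c hcmem
    simp only [List.mem_map] at hcmem
    obtain ⟨a, ha, rfl⟩ := hcmem
    have hb := List.all_eq_true.mp h.2 a ha
    have : a ∈ (['A', 'C', 'G', 'U', 'T', 'a', 'c', 'g', 'u', 't'] : List Char) := by simpa using hb
    fin_cases this <;> decide

-- a fold with independent 5-tuple components splits into five independent folds
lemma foldl_prod5 {ι σ1 σ2 σ3 σ4 σ5 : Type}
    (F1 : σ1 → ι → σ1) (F2 : σ2 → ι → σ2) (F3 : σ3 → ι → σ3) (F4 : σ4 → ι → σ4) (F5 : σ5 → ι → σ5)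
    (l : List ι) (a : σ1) (b : σ2) (c : σ3) (d : σ4) (e : σ5) :
    l.foldl (fun st i => (F1 st.1 i, F2 st.2.1 i, F3 st.2.2.1 i, F4 st.2.2.2.1 i, F5 st.2.2.2.2 i)) (a, b, c, d, e)
      = (l.foldl F1 a, l.foldl F2 b, l.foldl F3 c, l.foldl F4 d, l.foldl F5 e) := by
  induction l generalizing a b c d e with
  | nil => rfl
  | cons x xs ih => simpa [List.foldl_cons] using ih _ _ _ _ _

-- A's index loop reads exactly the adjacent pairs of the string, as 1-char strings
lemma map_pair_range (t : List Char) :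
    (PySem.List.pyRange 0 ((t.length : Int) - 1) 1).map
      (fun i => (String.ofList [(PySem.List.pyGet? t i).getD ' '], String.ofList [(PySem.List.pyGet? t (i+1)).getD ' ']))
    = (t.map (fun c => String.ofList [c])).zip ((t.map (fun c => String.ofList [c])).tail) := by
  apply List.ext_getElem
  · simp [PySem.List.length_pyRange_one]
  · intro k h1 h2
    have hlen : (PySem.List.pyRange 0 ((t.length : Int) - 1) 1).length = t.length - 1 := by
      simp [PySem.List.length_pyRange_one]
    have hk : k < t.length - 1 := by rw [List.length_map, hlen] at h1; exact h1
    rw [List.getElem_map, PySem.List.getElem_pyRange_one]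
    have e1 : (0 : Int) + (k : Int) = ((k : Nat) : Int) := by ring
    have e2 : ((k : Int)) + 1 = (((k+1) : Nat) : Int) := by push_cast; ring
    rw [e1, e2, PySem.List.pyGet?_natCast, PySem.List.pyGet?_natCast]
    rw [List.getElem_zip, List.getElem_tail, List.getElem_map, List.getElem_map]
    rw [List.getElem?_eq_getElem (by omega), List.getElem?_eq_getElem (by omega)]
    rfl

-- keys are unchanged by a modify-loop whose keys are already present
lemma keys_foldl_modify2 (P : List (String × String)) :
    ∀ (D : PySem.Dict String (PySem.Dict String Int)),
    (∀ p ∈ P, D.contains p.1 = true) →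
    (P.foldl (fun D p => D.modify p.1 PySem.Dict.empty (fun dx => dx.modify p.2 0 (· + 1))) D).keys = D.keys := by
  induction P with
  | nil => intro D _; rfl
  | cons p P ih =>
    intro D h
    have hp := h p (List.mem_cons_self ..)
    have hcont : ∀ q ∈ P, (D.modify p.1 PySem.Dict.empty (fun dx => dx.modify p.2 0 (· + 1))).contains q.1 = true := by
      intro q hq
      rw [PySem.Dict.contains_modify]
      simp [h q (List.mem_cons_of_mem _ hq)]
    rw [List.foldl_cons, ih _ hcont, PySem.Dict.keys_modify, PySem.Dict.keys_insert_of_contains _ _ hp]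

-- value of one row after the interleaved nested-modify loop: the tally of that key's successors
lemma getD_foldl_modify2 (P : List (String × String)) (x : String) :
    ∀ (D : PySem.Dict String (PySem.Dict String Int)), D.contains x = true →
    (P.foldl (fun D p => D.modify p.1 PySem.Dict.empty (fun dx => dx.modify p.2 0 (· + 1))) D).getD x PySem.Dict.empty
      = ((P.filter (fun p => p.1 == x)).map (·.2)).foldl (fun r y => r.modify y 0 (· + 1)) (D.getD x PySem.Dict.empty) := by
  induction P with
  | nil => intro D _; rfl
  | cons p P ih =>
    intro D hD
    by_cases hp : p.1 = x
    · have hcont : (D.modify p.1 PySem.Dict.empty (fun dx => dx.modify p.2 0 (· + 1))).contains x = true := by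
        rw [PySem.Dict.contains_modify]; simp [hD]
      rw [List.foldl_cons, ih _ hcont]
      rw [List.filter_cons_of_pos (by simp [hp]), List.map_cons, List.foldl_cons]
      rw [hp, PySem.Dict.getD_modify_self]
    · have hcont : (D.modify p.1 PySem.Dict.empty (fun dx => dx.modify p.2 0 (· + 1))).contains x = true := by
        rw [PySem.Dict.contains_modify]; simp [hD]
      rw [List.foldl_cons, ih _ hcont]
      rw [List.filter_cons_of_neg (by simp [hp])]
      rw [PySem.Dict.getD_modify_of_ne _ _ _ (fun h => hp h.symm)]

-- ===== VERDICT (by name: the statement is the Claim_ definition above) =====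
set_option maxHeartbeats 4000000 in
theorem compute_count_and_lists_spec : Claim_equal_compute_count_and_lists := by
  intro s _ hpre
  unfold Spec_compute_count_and_lists
  obtain ⟨h1, h2⟩ := norm_chars s hpre
  unfold compute_count_and_lists compute_count_and_lists_alt
  simp only [PySem.Str.len_eq, PySem.Str.pyGet?, PySem.Chars.pyGet?]
  generalize hgt : (PySem.Str.replace (PySem.Str.upper s) "T" "U").toList = t at h1 h2 ⊢
  have hinit : (List.foldl
      (fun (st : PySem.Dict String Int × PySem.Dict String (PySem.Dict String Int)) x =>
        (st.1.insert x 0,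
          List.foldl (fun d y => d.modify x PySem.Dict.empty fun dx => dx.insert y 0)
            (st.2.insert x PySem.Dict.empty) ["A", "C", "G", "U"]))
      (PySem.Dict.empty, PySem.Dict.empty) ["A", "C", "G", "U"])
      = (PySem.Dict.ofList [("A", 0), ("C", 0), ("G", 0), ("U", 0)],
         PySem.Dict.ofList
           [("A", PySem.Dict.ofList [("A", 0), ("C", 0), ("G", 0), ("U", 0)]),
            ("C", PySem.Dict.ofList [("A", 0), ("C", 0), ("G", 0), ("U", 0)]),
            ("G", PySem.Dict.ofList [("A", 0), ("C", 0), ("G", 0), ("U", 0)]),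
            ("U", PySem.Dict.ofList [("A", 0), ("C", 0), ("G", 0), ("U", 0)])]) := by decide
  rw [hinit]
  rw [foldl_prod5
    (fun (d : PySem.Dict String (List String)) (i : Int) => d.modify (String.ofList [(PySem.List.pyGet? t i).getD ' ']) [] fun x => x ++ [String.ofList [(PySem.List.pyGet? t (i+1)).getD ' ']])
    (fun (d : PySem.Dict String Int) (i : Int) => d.modify (String.ofList [(PySem.List.pyGet? t (i+1)).getD ' ']) 0 fun x => x + 1)
    (fun (n : Int) (_ : Int) => n + 1)
    (fun (d : PySem.Dict String (PySem.Dict String Int)) (i : Int) => d.modify (String.ofList [(PySem.List.pyGet? t i).getD ' ']) PySem.Dict.empty fun dx => dx.modify (String.ofList [(PySem.List.pyGet? t (i+1)).getD ' ']) 0 fun x => x + 1)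
    (fun (n : Int) (_ : Int) => n + 1)]
  simp only []
  rw [PySem.List.slice_from_one]
  have hbridge : ∀ {σ : Type} (g : σ → String × String → σ) (init : σ),
      List.foldl (fun d i => g d (String.ofList [(PySem.List.pyGet? t i).getD ' '], String.ofList [(PySem.List.pyGet? t (i+1)).getD ' '])) init (PySem.List.pyRange 0 ((t.length : Int) - 1) 1)
      = List.foldl g init ((t.map (fun c => String.ofList [c])).zip ((t.map (fun c => String.ofList [c])).tail)) := by
    intro σ g init
    rw [← map_pair_range t, List.foldl_map]
  have e1 : List.foldl
      (fun d i => d.modify (String.ofList [(PySem.List.pyGet? t i).getD ' ']) [] fun x => x ++ [String.ofList [(PySem.List.pyGet? t (i + 1)).getD ' ']])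
      (PySem.Dict.ofList [("A", []), ("G", []), ("C", []), ("U", [])]) (PySem.List.pyRange 0 ((t.length : Int) - 1))
      = List.foldl (fun d p => d.modify p.1 [] fun x => x ++ [p.2])
      (PySem.Dict.ofList [("A", []), ("G", []), ("C", []), ("U", [])])
      ((t.map (fun c => String.ofList [c])).zip ((t.map (fun c => String.ofList [c])).tail)) :=
    hbridge (fun (d : PySem.Dict String (List String)) (p : String × String) => d.modify p.1 [] fun x => x ++ [p.2]) _
  have e2 : List.foldl
      (fun d i => d.modify (String.ofList [(PySem.List.pyGet? t (i + 1)).getD ' ']) 0 fun x => x + 1)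
      ((PySem.Dict.ofList [("A", (0:Int)), ("C", 0), ("G", 0), ("U", 0)]).insert (String.ofList [(PySem.List.pyGet? t 0).getD ' ']) 1)
      (PySem.List.pyRange 0 ((t.length : Int) - 1))
      = List.foldl (fun d p => d.modify p.2 0 fun x => x + 1)
      ((PySem.Dict.ofList [("A", (0:Int)), ("C", 0), ("G", 0), ("U", 0)]).insert (String.ofList [(PySem.List.pyGet? t 0).getD ' ']) 1)
      ((t.map (fun c => String.ofList [c])).zip ((t.map (fun c => String.ofList [c])).tail)) :=
    hbridge (fun (d : PySem.Dict String Int) (p : String × String) => d.modify p.2 0 fun x => x + 1) _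
  have e4 : List.foldl
      (fun d i => d.modify (String.ofList [(PySem.List.pyGet? t i).getD ' ']) PySem.Dict.empty fun dx => dx.modify (String.ofList [(PySem.List.pyGet? t (i + 1)).getD ' ']) 0 fun x => x + 1)
      (PySem.Dict.ofList
        [("A", PySem.Dict.ofList [("A", (0:Int)), ("C", 0), ("G", 0), ("U", 0)]),
         ("C", PySem.Dict.ofList [("A", 0), ("C", 0), ("G", 0), ("U", 0)]),
         ("G", PySem.Dict.ofList [("A", 0), ("C", 0), ("G", 0), ("U", 0)]),
         ("U", PySem.Dict.ofList [("A", 0), ("C", 0), ("G", 0), ("U", 0)])])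
      (PySem.List.pyRange 0 ((t.length : Int) - 1))
      = List.foldl (fun d p => d.modify p.1 PySem.Dict.empty fun dx => dx.modify p.2 0 fun x => x + 1)
      (PySem.Dict.ofList
        [("A", PySem.Dict.ofList [("A", (0:Int)), ("C", 0), ("G", 0), ("U", 0)]),
         ("C", PySem.Dict.ofList [("A", 0), ("C", 0), ("G", 0), ("U", 0)]),
         ("G", PySem.Dict.ofList [("A", 0), ("C", 0), ("G", 0), ("U", 0)]),
         ("U", PySem.Dict.ofList [("A", 0), ("C", 0), ("G", 0), ("U", 0)])])
      ((t.map (fun c => String.ofList [c])).zip ((t.map (fun c => String.ofList [c])).tail)) :=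
    hbridge (fun (d : PySem.Dict String (PySem.Dict String Int)) (p : String × String) => d.modify p.1 PySem.Dict.empty fun dx => dx.modify p.2 0 fun x => x + 1) _
  rw [e1, e2, e4]
  have hsnd : ∀ (T : List String) (a : PySem.Dict String Int),
      List.foldl (fun d p => d.modify p.2 0 fun x => x + 1) a (T.zip T.tail)
      = List.foldl (fun d c => d.modify c 0 fun x => x + 1) a T.tail := by
    intro T a
    conv_rhs => rw [← List.map_snd_zip (l₁ := T) (l₂ := T.tail) (by simp [List.length_tail])]
    rw [List.foldl_map]
  simp only [Prod.mk.injEq]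
  refine ⟨?cnt, ?din, trivial⟩
  case cnt =>
    obtain ⟨c0, trest, rfl⟩ := List.exists_cons_of_ne_nil h1
    have hpy0 : PySem.List.pyGet? (c0 :: trest) (0 : Int) = some c0 := by
      have h0 := PySem.List.pyGet?_natCast (c0 :: trest) 0
      simp only [Nat.cast_zero, List.getElem?_cons_zero] at h0
      exact h0
    rw [hpy0]
    simp only [Option.getD_some, List.map_cons, List.tail_cons, List.foldl_cons]
    have ecnt := hsnd (String.ofList [c0] :: List.map (fun c => String.ofList [c]) trest)
      ((PySem.Dict.ofList [("A", (0:Int)), ("C", 0), ("G", 0), ("U", 0)]).insert (String.ofList [c0]) 1)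
    simp only [List.tail_cons] at ecnt
    rw [ecnt]
    have hstart : (PySem.Dict.ofList [("A", (0:Int)), ("C", 0), ("G", 0), ("U", 0)]).insert (String.ofList [c0]) 1
        = (PySem.Dict.ofList (List.map (fun x => (x, (0:Int))) ["A", "C", "G", "U"])).modify (String.ofList [c0]) 0 (fun x => x + 1) := by
      have hm := h2 c0 (List.mem_cons_self ..)
      fin_cases hm <;> decide
    rw [hstart]
    rfl
  case din =>
    set P : List (String × String) :=
      (List.map (fun c => String.ofList [c]) t).zip (List.map (fun c => String.ofList [c]) t).tail with hP
    have hmem1 : ∀ p ∈ P, p.1 ∈ (["A", "C", "G", "U"] : List String) := by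
      intro p hp
      obtain ⟨a, b⟩ := p
      have hfst := (List.of_mem_zip (hP ▸ hp)).1
      obtain ⟨c, hc, rfl⟩ := List.mem_map.mp hfst
      show String.ofList [c] ∈ _
      have hm := h2 c hc
      simp only [List.mem_cons, List.not_mem_nil, or_false] at hm
      rcases hm with rfl|rfl|rfl|rfl <;> decide
    have hcont : ∀ p ∈ P, (PySem.Dict.ofList
        [("A", PySem.Dict.ofList [("A", (0:Int)), ("C", 0), ("G", 0), ("U", 0)]),
         ("C", PySem.Dict.ofList [("A", 0), ("C", 0), ("G", 0), ("U", 0)]),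
         ("G", PySem.Dict.ofList [("A", 0), ("C", 0), ("G", 0), ("U", 0)]),
         ("U", PySem.Dict.ofList [("A", 0), ("C", 0), ("G", 0), ("U", 0)])]).contains p.1 = true := by
      intro p hp
      have hm := hmem1 p hp
      simp only [List.mem_cons, List.not_mem_nil, or_false] at hm
      rcases hm with hm|hm|hm|hm <;> rw [hm] <;> decide
    have hkeysA := keys_foldl_modify2 P _ hcont
    rw [show (PySem.Dict.ofList
        [("A", PySem.Dict.ofList [("A", (0:Int)), ("C", 0), ("G", 0), ("U", 0)]),
         ("C", PySem.Dict.ofList [("A", 0), ("C", 0), ("G", 0), ("U", 0)]),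
         ("G", PySem.Dict.ofList [("A", 0), ("C", 0), ("G", 0), ("U", 0)]),
         ("U", PySem.Dict.ofList [("A", 0), ("C", 0), ("G", 0), ("U", 0)])]).keys
      = (["A", "C", "G", "U"] : List String) from by decide] at hkeysA
    have hnodupA : (List.foldl (fun D p => D.modify p.1 PySem.Dict.empty fun dx => dx.modify p.2 0 fun x => x + 1)
        (PySem.Dict.ofList
          [("A", PySem.Dict.ofList [("A", (0:Int)), ("C", 0), ("G", 0), ("U", 0)]),
           ("C", PySem.Dict.ofList [("A", 0), ("C", 0), ("G", 0), ("U", 0)]),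
           ("G", PySem.Dict.ofList [("A", 0), ("C", 0), ("G", 0), ("U", 0)]),
           ("U", PySem.Dict.ofList [("A", 0), ("C", 0), ("G", 0), ("U", 0)])]) P).keys.Nodup := by
      rw [hkeysA]; decide
    rw [PySem.Dict.items_eq_map_keys _ hnodupA PySem.Dict.empty, hkeysA]
    have ehB : (List.foldl
        (fun (D : PySem.Dict String (PySem.Dict String Int)) x =>
          D.insert x
            (List.foldl (fun d c => d.modify c 0 fun x => x + 1)
              (PySem.Dict.ofList (List.map (fun x => (x, (0:Int))) ["A", "C", "G", "U"]))
              ((List.foldl (fun d p => d.modify p.1 [] fun x => x ++ [p.2])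
                    (PySem.Dict.ofList [("A", []), ("G", []), ("C", []), ("U", [])]) P).getD x [])))
        PySem.Dict.empty ["A", "C", "G", "U"]).items
        = (["A", "C", "G", "U"] : List String).map (fun x => (x,
            List.foldl (fun d c => d.modify c 0 fun x => x + 1)
              (PySem.Dict.ofList (List.map (fun x => (x, (0:Int))) ["A", "C", "G", "U"]))
              ((List.foldl (fun d p => d.modify p.1 [] fun x => x ++ [p.2])
                    (PySem.Dict.ofList [("A", []), ("G", []), ("C", []), ("U", [])]) P).getD x []))) :=
      PySem.Dict.items_foldl_insert_fresh ["A", "C", "G", "U"] (fun x => x)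
        (fun x => List.foldl (fun d c => d.modify c 0 fun x => x + 1)
              (PySem.Dict.ofList (List.map (fun x => (x, (0:Int))) ["A", "C", "G", "U"]))
              ((List.foldl (fun d p => d.modify p.1 [] fun x => x ++ [p.2])
                    (PySem.Dict.ofList [("A", []), ("G", []), ("C", []), ("U", [])]) P).getD x []))
        PySem.Dict.empty (fun a _ => rfl) (by decide)
    rw [ehB]
    simp only [List.map_cons, List.map_nil, List.cons.injEq, Prod.mk.injEq, true_and, and_true]
    have hgetD : ∀ x : String, x ∈ (["A", "C", "G", "U"] : List String) →
        ((List.foldl (fun D p => D.modify p.1 PySem.Dict.empty fun dx => dx.modify p.2 0 fun x => x + 1)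
          (PySem.Dict.ofList
            [("A", PySem.Dict.ofList [("A", (0:Int)), ("C", 0), ("G", 0), ("U", 0)]),
             ("C", PySem.Dict.ofList [("A", 0), ("C", 0), ("G", 0), ("U", 0)]),
             ("G", PySem.Dict.ofList [("A", 0), ("C", 0), ("G", 0), ("U", 0)]),
             ("U", PySem.Dict.ofList [("A", 0), ("C", 0), ("G", 0), ("U", 0)])]) P).getD x PySem.Dict.empty).items
        = (List.foldl (fun d c => d.modify c 0 fun x => x + 1)
              (PySem.Dict.ofList (List.map (fun x => (x, (0:Int))) ["A", "C", "G", "U"]))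
              ((List.foldl (fun d p => d.modify p.1 [] fun x => x ++ [p.2])
                    (PySem.Dict.ofList [("A", []), ("G", []), ("C", []), ("U", [])]) P).getD x [])).items := by
      intro x hx
      rw [getD_foldl_modify2 P x _ (by fin_cases hx <;> decide)]
      rw [PySem.Dict.getD_foldl_modify_append P _ x]
      fin_cases hx <;> rfl
    exact ⟨hgetD "A" (by decide), hgetD "C" (by decide), hgetD "G" (by decide), hgetD "U" (by decide)⟩
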